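-- pv_equiv track=rewrite | github.com/serverx-org/contests-solutions | ECP-week-3/15_inversion.py | flip_even_indices
-- ===== SOURCE A (Python) =====
-- def flip_even_indices(binary_input):
--     res = ''
--     for i in range(len(binary_input)):
--         if i % 2 != 0:
--             if binary_input[i] == '0':
--                 res += '1'
--             else:
--                 res += '0'
--         else:
--             res += binary_input[i]
--     return res
-- ===== SOURCE B (Python) =====
-- from itertools import zip_longest
--
-- def flip_even_indices(binary_input):
--     evens = binary_input[::2]
--     flipped = ('1' if c == '0' else '0' for c in binary_input[1::2])
--     return ''.join(a + b for a, b in zip_longest(evens, flipped, fillvalue=''))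
-- ===== Notes on version B (the rewrite author's own statement) =====
-- stated objective: alternative
-- what changed: Replaces the single indexed loop with a per-index parity test by slicing the string into even and odd position subsequences, flipping the odd slice, and interleaving the two with zip_longest.
import Mathlib
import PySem

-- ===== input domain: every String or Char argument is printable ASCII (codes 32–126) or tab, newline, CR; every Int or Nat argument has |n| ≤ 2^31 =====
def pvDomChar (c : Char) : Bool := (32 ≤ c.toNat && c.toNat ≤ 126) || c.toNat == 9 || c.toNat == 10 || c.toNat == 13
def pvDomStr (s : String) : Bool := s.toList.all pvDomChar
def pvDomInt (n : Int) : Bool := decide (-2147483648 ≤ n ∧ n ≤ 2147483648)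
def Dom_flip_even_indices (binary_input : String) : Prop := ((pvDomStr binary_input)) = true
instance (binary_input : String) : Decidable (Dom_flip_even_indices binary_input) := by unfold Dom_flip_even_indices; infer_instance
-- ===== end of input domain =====

-- B computes the two position-parity slices (evens kept, odds flipped) and interleaves them,
-- instead of A's single indexed loop with a parity test per index; objective: alternative decomposition.

-- ===== PORT A =====
-- index loop: for i in range(len(s)): parity test, res += …
def flip_even_indices (binary_input : String) : String :=
  String.mk ((PySem.List.pyRange 0 (binary_input.toList.length) 1).foldl
    (fun res i =>
      if i % 2 ≠ 0 then
        if PySem.List.pyGetD binary_input.toList i ' ' == '0' then res ++ ['1'] else res ++ ['0']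
      else res ++ [PySem.List.pyGetD binary_input.toList i ' ']) [])

-- ===== PORT B =====
-- every second element, starting with the head (s[::2] on a list of chars)
def pvEvery2 : List Char → List Char
  | [] => []
  | [x] => [x]
  | x :: _ :: r => x :: pvEvery2 r

def pvFlip (c : Char) : Char := if c == '0' then '1' else '0'

-- zip_longest(evens, odds, fillvalue='') followed by per-pair concatenation
def pvInterleave : List Char → List Char → List Char
  | [], ys => ys
  | x :: xs, [] => x :: xs
  | x :: xs, y :: ys => x :: y :: pvInterleave xs ys

def flip_even_indices_alt (binary_input : String) : String :=
  String.mk (pvInterleave (pvEvery2 binary_input.toList)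
    ((pvEvery2 (binary_input.toList.drop 1)).map pvFlip))

-- ===== PRECONDITION & SPEC =====
def Spec_flip_even_indices (binary_input : String) (out : String) : Prop := out = flip_even_indices_alt binary_input
instance (binary_input : String) (out : String) : Decidable (Spec_flip_even_indices binary_input out) := by unfold Spec_flip_even_indices; infer_instance

-- ===== CLAIM (what is proved, stated in full; the proofs are below) =====
def Claim_equal_flip_even_indices : Prop := ∀ (binary_input : String), Dom_flip_even_indices binary_input → Spec_flip_even_indices binary_input (flip_even_indices binary_input)

-- ===== LEMMAS AND PROOFS =====

def pvB (l : List Char) : List Char :=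
  pvInterleave (pvEvery2 l) ((pvEvery2 (l.drop 1)).map pvFlip)

theorem pvB_nil : pvB [] = [] := rfl

theorem pvB_single (x : Char) : pvB [x] = [x] := rfl

theorem pvB_cons2 (x y : Char) (r : List Char) :
    pvB (x :: y :: r) = x :: pvFlip y :: pvB r := by
  cases r with
  | nil => rfl
  | cons z r' => simp [pvB, pvEvery2, pvInterleave]

theorem pvA_loop (l : List Char) : ∀ (k : Int) (acc : List Char), k % 2 = 0 →
    (PySem.List.enumerate l k).foldl
      (fun res p =>
        if p.1 % 2 ≠ 0 then
          if p.2 == '0' then res ++ ['1'] else res ++ ['0']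
        else res ++ [p.2]) acc = acc ++ pvB l := by
  induction l using pvEvery2.induct with
  | case1 => intro k acc _; simp [PySem.List.enumerate, pvB_nil]
  | case2 x =>
    intro k acc hk
    have h1 : ¬ (k % 2 ≠ 0) := by omega
    rw [PySem.List.enumerate_cons, PySem.List.enumerate_nil, List.foldl_cons, List.foldl_nil,
      if_neg h1, pvB_single]
  | case3 x y r ih =>
    intro k acc hk
    have h1 : ¬ (k % 2 ≠ 0) := by omega
    have h2 : (k + 1) % 2 ≠ 0 := by omega
    have h3 : (k + 1 + 1) % 2 = 0 := by omega
    rw [PySem.List.enumerate_cons, PySem.List.enumerate_cons, List.foldl_cons, List.foldl_cons,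
      if_neg h1, if_pos h2, ih (k + 1 + 1) _ h3, pvB_cons2]
    by_cases h0 : y == '0' <;> simp [h0, pvFlip]

-- ===== VERDICT (by name: the statement is the Claim_ definition above) =====
theorem flip_even_indices_spec : Claim_equal_flip_even_indices := by
  intro s _
  unfold Spec_flip_even_indices flip_even_indices flip_even_indices_alt
  have he := PySem.List.enumerate_eq_map_pyRange s.toList ' '
  have : (PySem.List.pyRange 0 (s.toList.length) 1).foldl
      (fun res i =>
        if i % 2 ≠ 0 then
          if PySem.List.pyGetD s.toList i ' ' == '0' then res ++ ['1'] else res ++ ['0']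
        else res ++ [PySem.List.pyGetD s.toList i ' ']) [] = pvB s.toList := by
    have := pvA_loop s.toList 0 [] (by norm_num)
    rw [he, List.foldl_map] at this
    simpa using this
  rw [this]
  rfl
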